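-- pv_equiv track=rewrite | github.com/milehighfry405/gtm-factory | core/ui/state_manager.py | _parse_conversation_md
-- ===== SOURCE A (Python) =====
-- from typing import Optional, List, Dict, Any
--
-- def _parse_conversation_md(conversation_md: str) -> List[Dict[str, str]]:
--     """
--     Parse markdown conversation back to messages list.
--
--     Args:
--         conversation_md: Markdown formatted conversation
--
--     Returns:
--         List of chat messages
--     """
--     messages = []
--     current_role = None
--     current_content = []
--
--     for line in conversation_md.split("\n"):
--         if line.startswith("## USER"):
--             if current_role:
--                 messages.append({"role": current_role, "content": "\n".join(current_content).strip()})
--             current_role = "user"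
--             current_content = []
--         elif line.startswith("## ASSISTANT"):
--             if current_role:
--                 messages.append({"role": current_role, "content": "\n".join(current_content).strip()})
--             current_role = "assistant"
--             current_content = []
--         elif line.startswith("# "):
--             # Skip title
--             continue
--         else:
--             current_content.append(line)
--
--     # Add last message
--     if current_role:
--         messages.append({"role": current_role, "content": "\n".join(current_content).strip()})
--
--     return messages
-- ===== SOURCE B (Python) =====
-- def _parse_conversation_md(conversation_md):
--     """Segment-scanner reimplementation: locate each header, then consume its
--     body with an inner scan, instead of A's flush/accumulate state machine."""
--
--     def _role_of(line):
--         if line.startswith("## USER"):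
--             return "user"
--         if line.startswith("## ASSISTANT"):
--             return "assistant"
--         return None
--
--     lines = conversation_md.split("\n")
--     n = len(lines)
--     messages = []
--     i = 0
--     while i < n:
--         role = _role_of(lines[i])
--         i += 1
--         if role is None:
--             continue
--         body = []
--         while i < n and _role_of(lines[i]) is None:
--             if not lines[i].startswith("# "):
--                 body.append(lines[i])
--             i += 1
--         messages.append({"role": role, "content": "\n".join(body).strip()})
--     return messages
-- ===== Notes on version B (the rewrite author's own statement) =====
-- stated objective: alternative
-- what changed: Replaces A's single-pass flush/accumulate state machine (pending role + content buffer flushed at each header and at EOF) with a segment scanner: an index walks the lines, and at each header an inner scan consumes that message's body up to the next header.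
import Mathlib
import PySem

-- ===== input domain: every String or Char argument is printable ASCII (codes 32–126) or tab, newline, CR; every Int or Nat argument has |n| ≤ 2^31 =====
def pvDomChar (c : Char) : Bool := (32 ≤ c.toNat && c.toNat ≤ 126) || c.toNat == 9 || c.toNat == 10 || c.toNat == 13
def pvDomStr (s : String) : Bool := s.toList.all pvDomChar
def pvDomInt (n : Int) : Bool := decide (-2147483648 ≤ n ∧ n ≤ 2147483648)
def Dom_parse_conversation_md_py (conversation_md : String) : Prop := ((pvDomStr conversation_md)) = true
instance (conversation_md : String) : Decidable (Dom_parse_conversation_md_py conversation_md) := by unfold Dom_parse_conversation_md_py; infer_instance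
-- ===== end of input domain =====

-- B replaces A's flush/accumulate state machine by a header-then-body segment scanner (alternative decomposition, same cost).

-- ===== PORT A =====
-- the 'if current_role: messages.append(...)' flushes
def pvFlushA (msgs : List (List (String × String))) (role : Option String)
    (content : List String) : List (List (String × String)) :=
  match role with
  | some r => msgs ++ [[("role", r), ("content", PySem.Str.strip (PySem.Str.join "\n" content))]]
  | none => msgs

-- the 'for line in conversation_md.split("\n")' loop over state (messages, current_role, current_content)
def pvLoopA (lines : List String) (msgs : List (List (String × String)))
    (role : Option String) (content : List String) : List (List (String × String)) :=
  match lines with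
  | [] => pvFlushA msgs role content
  | l :: ls =>
    if PySem.Str.startswith l "## USER" then
      pvLoopA ls (pvFlushA msgs role content) (some "user") []
    else if PySem.Str.startswith l "## ASSISTANT" then
      pvLoopA ls (pvFlushA msgs role content) (some "assistant") []
    else if PySem.Str.startswith l "# " then
      pvLoopA ls msgs role content
    else
      pvLoopA ls msgs role (content ++ [l])

def parse_conversation_md_py (conversation_md : String) : List (List (String × String)) :=
  pvLoopA ((PySem.Str.split? conversation_md "\n").getD []) [] none []

-- ===== PORT B =====
def pvRoleOf (line : String) : Option String :=
  if PySem.Str.startswith line "## USER" then some "user"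
  else if PySem.Str.startswith line "## ASSISTANT" then some "assistant"
  else none

-- inner 'while i < n and _role_of(lines[i]) is None' body scan
def pvScanBody (lines : List String) (i : Nat) (body : List String) : List String × Nat :=
  if _h : i < lines.length ∧ pvRoleOf (lines.getD i "") = none then
    pvScanBody lines (i + 1)
      (if PySem.Str.startswith (lines.getD i "") "# " then body else body ++ [lines.getD i ""])
  else (body, i)
termination_by lines.length - i
decreasing_by omega

-- needed only for pvOuter's termination
theorem pvScanBody_ge (lines : List String) (i : Nat) (body : List String) :
    i ≤ (pvScanBody lines i body).2 := by
  fun_induction pvScanBody with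
  | case1 i body h ih => simp only [dite_eq_ite] at ih; omega
  | case2 => simp

-- outer 'while i < n' loop
def pvOuter (lines : List String) (i : Nat) (msgs : List (List (String × String))) :
    List (List (String × String)) :=
  if _h : i < lines.length then
    match pvRoleOf (lines.getD i "") with
    | none => pvOuter lines (i + 1) msgs
    | some r =>
      match hp : pvScanBody lines (i + 1) [] with
      | (body, j) =>
        pvOuter lines j
          (msgs ++ [[("role", r), ("content", PySem.Str.strip (PySem.Str.join "\n" body))]])
  else msgs
termination_by lines.length - i
decreasing_by
  · omega
  · have hge := pvScanBody_ge lines (i + 1) []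
    rw [hp] at hge
    omega

def parse_conversation_md_py_alt (conversation_md : String) : List (List (String × String)) :=
  pvOuter ((PySem.Str.split? conversation_md "\n").getD []) 0 []

-- ===== PRECONDITION & SPEC =====
def Spec_parse_conversation_md_py (conversation_md : String) (out : List (List (String × String))) : Prop := out = parse_conversation_md_py_alt conversation_md
instance (conversation_md : String) (out : List (List (String × String))) : Decidable (Spec_parse_conversation_md_py conversation_md out) := by unfold Spec_parse_conversation_md_py; infer_instance

-- ===== CLAIM (what is proved, stated in full; the proofs are below) =====
def Claim_equal_parse_conversation_md_py : Prop := ∀ (conversation_md : String), Dom_parse_conversation_md_py conversation_md → Spec_parse_conversation_md_py conversation_md (parse_conversation_md_py conversation_md)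

-- ===== LEMMAS AND PROOFS =====

-- shared characterization: one message per header line, its body the lines up to the next header
def pvNh (l : String) : Bool := (pvRoleOf l).isNone
def pvNt (l : String) : Bool := !PySem.Str.startswith l "# "

def pvSegs : List String → List (List (String × String))
  | [] => []
  | l :: ls =>
    match pvRoleOf l with
    | none => pvSegs ls
    | some r =>
      [("role", r), ("content", PySem.Str.strip (PySem.Str.join "\n"
          ((ls.takeWhile pvNh).filter pvNt)))] :: pvSegs (ls.dropWhile pvNh)
termination_by ls => ls.length
decreasing_by
  · simp
  · have := List.length_dropWhile_le pvNh ls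
    simp only [List.length_cons]
    omega

theorem pvSegs_nil : pvSegs [] = [] := by rw [pvSegs.eq_def]

theorem pvSegs_cons_none (l : String) (ls : List String) (h : pvRoleOf l = none) :
    pvSegs (l :: ls) = pvSegs ls := by
  rw [pvSegs.eq_def]; simp [h]

theorem pvSegs_cons_some (l : String) (ls : List String) (r : String)
    (h : pvRoleOf l = some r) :
    pvSegs (l :: ls) = [("role", r), ("content", PySem.Str.strip (PySem.Str.join "\n"
      ((ls.takeWhile pvNh).filter pvNt)))] :: pvSegs (ls.dropWhile pvNh) := by
  rw [pvSegs.eq_def]; simp [h]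

theorem pvLoopA_some (ls : List String) (msgs : List (List (String × String)))
    (r : String) (c : List String) :
    pvLoopA ls msgs (some r) c =
      msgs ++ ([("role", r), ("content", PySem.Str.strip (PySem.Str.join "\n"
        (c ++ (ls.takeWhile pvNh).filter pvNt)))] :: pvSegs (ls.dropWhile pvNh)) := by
  induction ls generalizing msgs r c with
  | nil => rw [pvLoopA, pvFlushA]; simp [pvSegs_nil]
  | cons l ls ih =>
    rw [pvLoopA]
    cases h1 : PySem.Str.startswith l "## USER" with
    | true =>
      have hR : pvRoleOf l = some "user" := by rw [pvRoleOf, h1]; rfl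
      have hnh : pvNh l = false := by rw [pvNh, hR]; rfl
      rw [if_pos rfl, pvFlushA, ih]
      simp [hnh, pvSegs_cons_some l ls _ hR]
    | false =>
      rw [if_neg (by simp)]
      cases h2 : PySem.Str.startswith l "## ASSISTANT" with
      | true =>
        have hR : pvRoleOf l = some "assistant" := by rw [pvRoleOf, h1, h2]; rfl
        have hnh : pvNh l = false := by rw [pvNh, hR]; rfl
        rw [if_pos rfl, pvFlushA, ih]
        simp [hnh, pvSegs_cons_some l ls _ hR]
      | false =>
        have hR : pvRoleOf l = none := by rw [pvRoleOf, h1, h2]; rfl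
        have hnh : pvNh l = true := by rw [pvNh, hR]; rfl
        rw [if_neg (by simp)]
        cases h3 : PySem.Str.startswith l "# " with
        | true =>
          have hnt : pvNt l = false := by rw [pvNt, h3]; rfl
          rw [if_pos rfl, ih]
          simp [hnh, hnt]
        | false =>
          have hnt : pvNt l = true := by rw [pvNt, h3]; rfl
          rw [if_neg (by simp), ih]
          simp [hnh, hnt]

theorem pvLoopA_none (ls : List String) (msgs : List (List (String × String)))
    (c : List String) :
    pvLoopA ls msgs none c = msgs ++ pvSegs ls := by
  induction ls generalizing msgs c with
  | nil => rw [pvLoopA, pvFlushA]; simp [pvSegs_nil]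
  | cons l ls ih =>
    rw [pvLoopA]
    cases h1 : PySem.Str.startswith l "## USER" with
    | true =>
      have hR : pvRoleOf l = some "user" := by rw [pvRoleOf, h1]; rfl
      rw [if_pos rfl, pvFlushA, pvLoopA_some, pvSegs_cons_some l ls _ hR]
      simp
    | false =>
      rw [if_neg (by simp)]
      cases h2 : PySem.Str.startswith l "## ASSISTANT" with
      | true =>
        have hR : pvRoleOf l = some "assistant" := by rw [pvRoleOf, h1, h2]; rfl
        rw [if_pos rfl, pvFlushA, pvLoopA_some, pvSegs_cons_some l ls _ hR]
        simp
      | false =>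
        have hR : pvRoleOf l = none := by rw [pvRoleOf, h1, h2]; rfl
        rw [if_neg (by simp), pvSegs_cons_none l ls hR]
        cases h3 : PySem.Str.startswith l "# " with
        | true => rw [if_pos rfl, ih]
        | false => rw [if_neg (by simp), ih]

theorem pvScanBody_eq (lines : List String) (i : Nat) (body : List String) :
    pvScanBody lines i body =
      (body ++ ((lines.drop i).takeWhile pvNh).filter pvNt,
       i + ((lines.drop i).takeWhile pvNh).length) := by
  fun_induction pvScanBody with
  | case1 i body h ih =>
    obtain ⟨hi, hr⟩ := h
    simp only [dite_eq_ite] at ih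
    have hd : lines.drop i = lines.getD i "" :: lines.drop (i + 1) := by
      rw [List.getD_eq_getElem lines "" hi, List.drop_eq_getElem_cons hi]
    have hnh : pvNh (lines.getD i "") = true := by rw [pvNh, hr]; rfl
    rw [ih, hd]
    simp only [List.takeWhile_cons, hnh, if_true, List.filter_cons, List.length_cons,
      Prod.mk.injEq]
    cases hs : PySem.Str.startswith (lines.getD i "") "# " with
    | true =>
      have hnt : pvNt (lines.getD i "") = false := by rw [pvNt, hs]; rfl
      simp only [List.getD] at hnt
      simp [hnt]; omega
    | false =>
      have hnt : pvNt (lines.getD i "") = true := by rw [pvNt, hs]; rfl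
      simp only [List.getD] at hnt
      simp [hnt]; omega
  | case2 i body h =>
    by_cases hi : i < lines.length
    · have hr : ¬ pvRoleOf (lines.getD i "") = none := by tauto
      have hnh : pvNh (lines.getD i "") = false := by
        rcases h' : pvRoleOf (lines.getD i "") with _ | r
        · exact absurd h' hr
        · rw [pvNh, h']; rfl
      have hd : lines.drop i = lines.getD i "" :: lines.drop (i + 1) := by
        rw [List.getD_eq_getElem lines "" hi, List.drop_eq_getElem_cons hi]
      rw [hd]
      simp only [List.takeWhile_cons, hnh, Bool.false_eq_true, if_false, List.filter_nil,
        List.length_nil, List.append_nil, Nat.add_zero]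
    · have h0 : lines.drop i = [] := List.drop_eq_nil_of_le (by omega)
      simp [h0]

theorem pvDropLenTakeWhile (p : String → Bool) (l : List String) :
    l.drop ((l.takeWhile p).length) = l.dropWhile p := by
  induction l with
  | nil => simp
  | cons a l ih =>
    by_cases h : p a = true
    · simp [h, ih]
    · simp [h]

theorem pvOuter_eq (lines : List String) (i : Nat) (msgs : List (List (String × String))) :
    pvOuter lines i msgs = msgs ++ pvSegs (lines.drop i) := by
  fun_induction pvOuter with
  | case1 i msgs hi hr ih =>
    have hd : lines.drop i = lines.getD i "" :: lines.drop (i + 1) := by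
      rw [List.getD_eq_getElem lines "" hi, List.drop_eq_getElem_cons hi]
    rw [ih, hd, pvSegs_cons_none _ _ hr]
  | case2 i msgs hi r hr body j hp ih =>
    have hd : lines.drop i = lines.getD i "" :: lines.drop (i + 1) := by
      rw [List.getD_eq_getElem lines "" hi, List.drop_eq_getElem_cons hi]
    rw [pvScanBody_eq] at hp
    have hb : body = ((lines.drop (i + 1)).takeWhile pvNh).filter pvNt := by
      have := congrArg Prod.fst hp; simpa using this.symm
    have hj : j = i + 1 + ((lines.drop (i + 1)).takeWhile pvNh).length := by
      have := congrArg Prod.snd hp; simpa using this.symm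
    subst hb hj
    have hdw : lines.drop (i + 1 + ((lines.drop (i + 1)).takeWhile pvNh).length) =
        (lines.drop (i + 1)).dropWhile pvNh := by
      rw [← pvDropLenTakeWhile pvNh (lines.drop (i + 1)), List.drop_drop, Nat.add_comm]
    rw [hdw] at ih
    rw [ih, hd, pvSegs_cons_some _ _ _ hr]
    simp
  | case3 i msgs hi =>
    have h0 : lines.drop i = [] := List.drop_eq_nil_of_le (by omega)
    rw [h0, pvSegs_nil]
    simp

-- ===== VERDICT (by name: the statement is the Claim_ definition above) =====
theorem parse_conversation_md_py_spec : Claim_equal_parse_conversation_md_py := by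
  intro md _
  unfold Spec_parse_conversation_md_py parse_conversation_md_py parse_conversation_md_py_alt
  rw [pvLoopA_none, pvOuter_eq]
  simp
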